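-- pv_equiv track=rewrite | github.com/Shu12388y/DSA_in_python | hashing/budget.py | budget
-- ===== SOURCE A (Python) =====
-- def budget(k,m,b):
--             price = []
--             for i in range(len(k)):
--                 temp = k[i]
--                 for j in range(len(m)):
--                     if(temp+m[j] <= b):
--                         price.append(temp + m[j])
--             max_num = max(price)
--             if(max_num < b):
--                 return max_num
--             else:
--                 return -1
-- ===== SOURCE B (Python) =====
-- def budget(k, m, b):
--     # Sort m once; for each keyboard price binary-search the largest drive price
--     # that still fits the budget.  O((n+m) log m) instead of A's O(n*m).
--     ms = sorted(m)
--     best = None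
--     for x in k:
--         t = b - x
--         lo, hi = 0, len(ms)
--         while lo < hi:
--             mid = (lo + hi) // 2
--             if ms[mid] <= t:
--                 lo = mid + 1
--             else:
--                 hi = mid
--         if lo > 0:
--             s = x + ms[lo - 1]
--             if best is None or s > best:
--                 best = s
--     if best is None or best == b:
--         return -1
--     return best
-- ===== Notes on version B (the rewrite author's own statement) =====
-- stated objective: faster
-- what changed: A enumerates every pair k[i]+m[j] into a list and takes max; B sorts m once and, for each k[i], binary-searches the largest m[j] <= b-k[i], tracking the running best.
import Mathlib
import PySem

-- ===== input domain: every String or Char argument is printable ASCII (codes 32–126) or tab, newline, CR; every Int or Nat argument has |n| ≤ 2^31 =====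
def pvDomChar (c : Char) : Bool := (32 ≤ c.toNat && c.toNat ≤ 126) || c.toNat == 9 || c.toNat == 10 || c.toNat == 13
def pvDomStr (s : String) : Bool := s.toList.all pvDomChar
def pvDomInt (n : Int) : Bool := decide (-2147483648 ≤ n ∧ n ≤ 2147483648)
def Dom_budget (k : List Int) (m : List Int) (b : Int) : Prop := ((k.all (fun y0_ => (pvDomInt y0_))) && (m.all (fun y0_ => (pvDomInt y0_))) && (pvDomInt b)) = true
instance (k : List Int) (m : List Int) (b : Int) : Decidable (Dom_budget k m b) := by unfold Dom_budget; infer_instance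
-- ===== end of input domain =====

-- B replaces A's full pairwise enumeration by sorting m once and binary-searching,
-- per element of k, the largest element of m that fits the budget (objective: faster).

-- B replaces A's full pairwise enumeration by sorting m once and binary-searching,
-- per element of k, the largest element of m that fits the budget (objective: faster).

-- ===== PORT A =====
-- literal transliteration of A: build the list `price` of all pair sums ≤ b, take max(price),
-- return it if < b else -1.  k[i]/m[j] are in-range non-negative indices, so pyGetD is exact.
def budget (k : List Int) (m : List Int) (b : Int) : Int :=
  let price : List Int :=
    (PySem.List.pyRange 0 (PySem.List.len k)).foldl (fun acc i =>
      let temp := PySem.List.pyGetD k i 0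
      (PySem.List.pyRange 0 (PySem.List.len m)).foldl (fun acc2 j =>
        if temp + PySem.List.pyGetD m j 0 ≤ b then acc2 ++ [temp + PySem.List.pyGetD m j 0]
        else acc2) acc) []
  match PySem.List.max? price (fun y => y) with
  | some mx => if mx < b then mx else -1
  | none => -1   -- Python raises ValueError (max of empty list) here; excluded by Pre_budget


-- ===== PORT B =====
-- B's hand-written `while lo < hi` binary search (rightmost insertion point for t in ms),
-- as structural recursion on fuel = hi - lo (the loop bound; never exhausted).
-- lo, hi stay in [0, len ms], so Nat with `/ 2` matches Python's ints with `// 2` exactly,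
-- and ms[mid] (0 ≤ mid < len ms) is getD.
def bsLoop (ms : List Int) (t : Int) : Nat → Nat → Nat → Nat
  | 0, lo, _ => lo
  | fuel + 1, lo, hi =>
    if lo < hi then
      let mid := (lo + hi) / 2
      if ms.getD mid 0 ≤ t then bsLoop ms t fuel (mid + 1) hi
      else bsLoop ms t fuel lo mid
    else lo


def budget_alt (k : List Int) (m : List Int) (b : Int) : Int :=
  let ms := PySem.List.sorted m (fun y => y)
  let best : Option Int :=
    k.foldl (fun best x =>
      let t := b - x
      let lo := bsLoop ms t ms.length 0 ms.length
      if 0 < lo then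
        let s := x + ms.getD (lo - 1) 0
        match best with
        | none => some s
        | some v => if s > v then some s else best
      else best) none
  match best with
  | none => -1
  | some v => if v = b then -1 else v


-- ===== PRECONDITION & SPEC =====
-- Pre_ excludes exactly the inputs on which A raises ValueError: those with no pair k[i]+m[j] ≤ b
-- (in particular an empty k or m), where `max(price)` is applied to the empty list.
def Pre_budget (k : List Int) (m : List Int) (b : Int) : Prop :=
  ∃ x ∈ k, ∃ y ∈ m, x + y ≤ b
instance (k : List Int) (m : List Int) (b : Int) : Decidable (Pre_budget k m b) := by
  unfold Pre_budget; infer_instance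
def pvWitness_budget : List Int × List Int × Int := ([1], [2], 5)

def Spec_budget (k : List Int) (m : List Int) (b : Int) (out : Int) : Prop := out = budget_alt k m b
instance (k : List Int) (m : List Int) (b : Int) (out : Int) : Decidable (Spec_budget k m b out) := by
  unfold Spec_budget; infer_instance

-- ===== CLAIM (what is proved, stated in full; the proofs are below) =====
def Claim_equal_budget : Prop := ∀ (k : List Int) (m : List Int) (b : Int), Dom_budget k m b → Pre_budget k m b → Spec_budget k m b (budget k m b)

-- ===== LEMMAS AND PROOFS =====

def validSums (k : List Int) (m : List Int) (b : Int) : List Int :=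
  k.flatMap (fun x => (m.filter (fun y => decide (x + y ≤ b))).map (fun y => x + y))

lemma getD_mono {ms : List Int} (hs : List.Pairwise (· ≤ ·) ms) {i j : Nat}
    (hij : i ≤ j) (hj : j < ms.length) : ms.getD i 0 ≤ ms.getD j 0 := by
  rcases Nat.lt_or_ge i j with h | h
  · rw [List.getD_eq_getElem ms 0 (Nat.lt_trans h hj), List.getD_eq_getElem ms 0 hj]
    exact (List.pairwise_iff_getElem.mp hs) i j _ hj h
  · have : i = j := Nat.le_antisymm hij h
    subst this; exact le_refl _

lemma bsLoop_spec {ms : List Int} (hs : List.Pairwise (· ≤ ·) ms) (t : Int) :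
    ∀ fuel lo hi, hi - lo ≤ fuel → lo ≤ hi → hi ≤ ms.length →
    (∀ i, i < lo → ms.getD i 0 ≤ t) →
    (∀ i, hi ≤ i → i < ms.length → t < ms.getD i 0) →
    bsLoop ms t fuel lo hi ≤ ms.length ∧
    (∀ i, i < bsLoop ms t fuel lo hi → ms.getD i 0 ≤ t) ∧
    (∀ i, bsLoop ms t fuel lo hi ≤ i → i < ms.length → t < ms.getD i 0) := by
  intro fuel
  induction fuel with
  | zero =>
    intro lo hi hfuel hlh hlen hlow hhigh
    have : lo = hi := by omega
    subst this
    exact ⟨hlen, fun i hi' => hlow i hi', fun i h1 h2 => hhigh i h1 h2⟩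
  | succ fuel ih =>
    intro lo hi hfuel hlh hlen hlow hhigh
    by_cases hcmp : lo < hi
    · simp only [bsLoop, if_pos hcmp]
      by_cases hms : ms.getD ((lo + hi) / 2) 0 ≤ t
      · rw [if_pos hms]
        exact ih ((lo + hi) / 2 + 1) hi (by omega) (by omega) hlen
          (fun i hi' => le_trans (getD_mono hs (by omega) (by omega)) hms) hhigh
      · rw [if_neg hms]
        exact ih lo ((lo + hi) / 2) (by omega) (by omega) (by omega) hlow
          (fun i h1 h2 => lt_of_lt_of_le (lt_of_not_ge hms) (getD_mono hs h1 h2))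
    · simp only [bsLoop, if_neg hcmp]
      exact ⟨by omega, fun i hi' => hlow i hi', fun i h1 h2 => hhigh i (by omega) h2⟩

-- proof-side shorthands for B's loop
def cand (ms : List Int) (b x : Int) : Option Int :=
  if 0 < bsLoop ms (b - x) ms.length 0 ms.length then
    some (x + ms.getD (bsLoop ms (b - x) ms.length 0 ms.length - 1) 0)
  else none

def omax (a : Option Int) (s : Int) : Option Int :=
  some (match a with | none => s | some v => max v s)

def stepB (ms : List Int) (b : Int) (best : Option Int) (x : Int) : Option Int :=
  let t := b - x
  let lo := bsLoop ms t ms.length 0 ms.length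
  if 0 < lo then
    let s := x + ms.getD (lo - 1) 0
    match best with
    | none => some s
    | some v => if s > v then some s else best
  else best

lemma stepB_eq (ms : List Int) (b : Int) (best : Option Int) (x : Int) :
    stepB ms b best x = match cand ms b x with
      | none => best
      | some s => omax best s := by
  unfold stepB cand omax
  by_cases h : 0 < bsLoop ms (b - x) ms.length 0 ms.length
  · simp only [if_pos h]
    cases best with
    | none => rfl
    | some v =>
      by_cases hv : x + ms.getD (bsLoop ms (b - x) ms.length 0 ms.length - 1) 0 > v
      · simp only [if_pos hv]
        congr 1
        omega
      · simp only [if_neg hv]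
        congr 1
        omega
  · simp only [if_neg h]

lemma foldl_stepB (ms : List Int) (b : Int) :
    ∀ (k : List Int) (best : Option Int),
      k.foldl (stepB ms b) best = (k.filterMap (cand ms b)).foldl omax best := by
  intro k
  induction k with
  | nil => intro best; rfl
  | cons x k ih =>
    intro best
    simp only [List.foldl_cons, List.filterMap_cons]
    rw [stepB_eq]
    cases h : cand ms b x with
    | none => simp only [ih]
    | some s => simp only [List.foldl_cons, ih]

lemma omax_some : ∀ (C : List Int) (v : Int), C.foldl omax (some v) = some (C.foldl max v) := by
  intro C
  induction C with
  | nil => intro v; rfl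
  | cons c C ih => intro v; simp only [List.foldl_cons, omax, ih]

lemma cand_mem_valid {ms : List Int} {m k : List Int} {b x s : Int}
    (hperm : ms.Perm m) (hs : List.Pairwise (· ≤ ·) ms)
    (hx : x ∈ k) (hc : cand ms b x = some s) :
    s ∈ validSums k m b := by
  unfold cand at hc
  by_cases h : 0 < bsLoop ms (b - x) ms.length 0 ms.length
  · rw [if_pos h] at hc
    injection hc with hc'
    obtain ⟨hle, hlow, hhigh⟩ := bsLoop_spec hs (b - x) ms.length 0 ms.length
      (by omega) (by omega) (le_refl _) (by omega) (by omega)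
    set r := bsLoop ms (b - x) ms.length 0 ms.length with hr
    have hrm : r - 1 < ms.length := by omega
    have hy : ms.getD (r - 1) 0 ∈ ms := by
      rw [List.getD_eq_getElem ms 0 hrm]; exact List.getElem_mem hrm
    have hyb : x + ms.getD (r - 1) 0 ≤ b := by
      have := hlow (r - 1) (by omega); omega
    rw [validSums, List.mem_flatMap]
    refine ⟨x, hx, ?_⟩
    rw [List.mem_map]
    exact ⟨ms.getD (r - 1) 0, by
      rw [List.mem_filter]
      exact ⟨hperm.mem_iff.mp hy, by simpa using hyb⟩, hc'⟩
  · rw [if_neg h] at hc; cases hc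

lemma valid_le_cand {ms : List Int} {m k : List Int} {b s : Int}
    (hperm : ms.Perm m) (hs : List.Pairwise (· ≤ ·) ms)
    (hv : s ∈ validSums k m b) :
    ∃ x ∈ k, ∃ c, cand ms b x = some c ∧ s ≤ c := by
  rw [validSums, List.mem_flatMap] at hv
  obtain ⟨x, hx, hmem⟩ := hv
  rw [List.mem_map] at hmem
  obtain ⟨y, hyf, rfl⟩ := hmem
  rw [List.mem_filter] at hyf
  obtain ⟨hym, hyb⟩ := hyf
  have hyb' : x + y ≤ b := by simpa using hyb
  have hyms : y ∈ ms := hperm.mem_iff.mpr hym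
  obtain ⟨i, hi, hyi⟩ := List.mem_iff_getElem.mp hyms
  obtain ⟨hle, hlow, hhigh⟩ := bsLoop_spec hs (b - x) ms.length 0 ms.length
    (by omega) (by omega) (le_refl _) (by omega) (by omega)
  set r := bsLoop ms (b - x) ms.length 0 ms.length with hr
  have hgi : ms.getD i 0 = y := by rw [List.getD_eq_getElem ms 0 hi]; exact hyi
  have hilt : i < r := by
    by_contra hcon
    have := hhigh i (by omega) hi
    omega
  have hrpos : 0 < r := by omega
  refine ⟨x, hx, x + ms.getD (r - 1) 0, ?_, ?_⟩
  · unfold cand; rw [if_pos hrpos]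
  · have : ms.getD i 0 ≤ ms.getD (r - 1) 0 := getD_mono hs (by omega) (by omega)
    omega


lemma price_eq (k m : List Int) (b : Int) :
    (PySem.List.pyRange 0 (PySem.List.len k)).foldl (fun acc i =>
      let temp := PySem.List.pyGetD k i 0
      (PySem.List.pyRange 0 (PySem.List.len m)).foldl (fun acc2 j =>
        if temp + PySem.List.pyGetD m j 0 ≤ b then acc2 ++ [temp + PySem.List.pyGetD m j 0]
        else acc2) acc) [] = validSums k m b := by
  rw [PySem.List.foldl_pyRange_pyGetD k 0
      (f := fun acc temp => (PySem.List.pyRange 0 (PySem.List.len m)).foldl (fun acc2 j =>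
        if temp + PySem.List.pyGetD m j 0 ≤ b then acc2 ++ [temp + PySem.List.pyGetD m j 0]
        else acc2) acc) [] (le_refl 0)]
  rw [show (0:Int).toNat = 0 from rfl, List.drop_zero]
  have hinner : ∀ (x : Int) (acc : List Int),
      (PySem.List.pyRange 0 (PySem.List.len m)).foldl (fun acc2 j =>
        if x + PySem.List.pyGetD m j 0 ≤ b then acc2 ++ [x + PySem.List.pyGetD m j 0]
        else acc2) acc
      = acc ++ (m.filter (fun y => decide (x + y ≤ b))).map (fun y => x + y) := by
    intro x acc
    rw [PySem.List.foldl_pyRange_pyGetD m 0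
        (f := fun acc2 y => if x + y ≤ b then acc2 ++ [x + y] else acc2) acc (le_refl 0)]
    rw [show (0:Int).toNat = 0 from rfl, List.drop_zero]
    exact PySem.List.foldl_append_ite (fun y => x + y ≤ b) (fun y => x + y) m acc
  calc k.foldl (fun acc x => (PySem.List.pyRange 0 (PySem.List.len m)).foldl (fun acc2 j =>
        if x + PySem.List.pyGetD m j 0 ≤ b then acc2 ++ [x + PySem.List.pyGetD m j 0]
        else acc2) acc) []
      = k.foldl (fun acc x => acc ++ (m.filter (fun y => decide (x + y ≤ b))).map (fun y => x + y)) [] := by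
        exact PySem.List.foldl_congr_mem (l := k) (init := ([] : List Int)) (h := fun acc x _ => hinner x acc)
    _ = validSums k m b := by
        rw [PySem.List.foldl_append_eq_flatMap]; rfl

lemma valid_le_b {k m : List Int} {b s : Int} (h : s ∈ validSums k m b) : s ≤ b := by
  rw [validSums, List.mem_flatMap] at h
  obtain ⟨x, _, hmem⟩ := h
  rw [List.mem_map] at hmem
  obtain ⟨y, hyf, rfl⟩ := hmem
  rw [List.mem_filter] at hyf
  simpa using hyf.2

lemma budget_eq : ∀ (k m : List Int) (b : Int),
    (∃ x ∈ k, ∃ y ∈ m, x + y ≤ b) → budget k m b = budget_alt k m b := by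
  intro k m b hpre
  have hperm := PySem.List.sorted_perm m (fun y => y) false
  have hs := PySem.List.sorted_pairwise m (fun y => y)
  set ms := PySem.List.sorted m (fun y => y) with hms
  have hA : budget k m b = (match PySem.List.max? (validSums k m b) (fun y => y) with
      | some mx => if mx < b then mx else -1
      | none => -1) := by
    show (match PySem.List.max? ((PySem.List.pyRange 0 (PySem.List.len k)).foldl (fun acc i =>
      let temp := PySem.List.pyGetD k i 0
      (PySem.List.pyRange 0 (PySem.List.len m)).foldl (fun acc2 j =>
        if temp + PySem.List.pyGetD m j 0 ≤ b then acc2 ++ [temp + PySem.List.pyGetD m j 0]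
        else acc2) acc) []) (fun y => y) with
      | some mx => if mx < b then mx else -1
      | none => -1) = _
    rw [price_eq]
  have hB : budget_alt k m b = (match (k.filterMap (cand ms b)).foldl omax none with
      | none => -1
      | some v => if v = b then -1 else v) := by
    show (match k.foldl (stepB ms b) none with
      | none => -1
      | some v => if v = b then -1 else v) = _
    rw [foldl_stepB]
  rw [hA, hB]
  obtain ⟨x0, hx0, y0, hy0, hxy0⟩ := hpre
  have hv0 : x0 + y0 ∈ validSums k m b := by
    rw [validSums, List.mem_flatMap]
    exact ⟨x0, hx0, List.mem_map.mpr ⟨y0, List.mem_filter.mpr ⟨hy0, by simpa using hxy0⟩, rfl⟩⟩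
  cases hmax : PySem.List.max? (validSums k m b) (fun y => y) with
  | none =>
    exfalso
    rw [(PySem.List.max?_eq_none_iff _ _).mp hmax] at hv0
    exact List.not_mem_nil hv0
  | some va =>
    have hvaM : va ∈ validSums k m b := PySem.List.max?_mem hmax
    have hvaU : ∀ u ∈ validSums k m b, u ≤ va := PySem.List.max?_isMax hmax
    obtain ⟨x1, hx1, c0, hc0, _⟩ := valid_le_cand hperm hs hv0
    have hc0C : c0 ∈ k.filterMap (cand ms b) := List.mem_filterMap.mpr ⟨x1, hx1, hc0⟩
    cases hC : k.filterMap (cand ms b) with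
    | nil => exact absurd (hC ▸ hc0C) (List.not_mem_nil)
    | cons c C' =>
      have hfold : (c :: C').foldl omax none = some (C'.foldl max c) := by
        simp only [List.foldl_cons, omax, omax_some]
      rw [hfold]
      set vb := C'.foldl max c with hvb
      have hvbC : vb ∈ k.filterMap (cand ms b) := by
        rw [hC]
        rcases PySem.List.foldl_max_mem C' c with h | h
        · rw [hvb, h]; exact List.mem_cons_self
        · exact List.mem_cons_of_mem c (hvb ▸ h)
      have hub : ∀ u ∈ k.filterMap (cand ms b), u ≤ vb := by
        rw [hC]
        intro u hu
        rcases List.mem_cons.mp hu with rfl | h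
        · exact (PySem.List.le_foldl_max C' u).1
        · exact (PySem.List.le_foldl_max C' c).2 u h
      obtain ⟨x2, hx2, hcand2⟩ := List.mem_filterMap.mp hvbC
      have h1 : vb ≤ va := hvaU vb (cand_mem_valid hperm hs hx2 hcand2)
      have h2 : va ≤ vb := by
        obtain ⟨x3, hx3, c3, hc3, hle3⟩ := valid_le_cand hperm hs hvaM
        exact le_trans hle3 (hub c3 (List.mem_filterMap.mpr ⟨x3, hx3, hc3⟩))
      have hvab : va = vb := le_antisymm h2 h1
      have hvale : va ≤ b := valid_le_b hvaM
      show (if va < b then va else -1) = if vb = b then -1 else vb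
      rw [← hvab]
      split_ifs <;> omega


-- ===== VERDICT (by name: the statement is the Claim_ definition above) =====
theorem budget_spec : Claim_equal_budget :=
  fun k m b _ hpre => budget_eq k m b hpre
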